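-- pv_equiv track=rewrite | github.com/John3210of/AnyPrac | 6oj/1043.py | solution
-- ===== SOURCE A (Python) =====
-- def solution(truth,parties):
--     truth=set(truth)
--     for _ in range(len(parties)):
--         for party in parties:
--             if set(party)&truth:
--                     truth.update(set(party))
--     count=0
--     for party in parties:
--         if not set(party)&truth:
--             count+=1
--     return count
-- ===== SOURCE B (Python) =====
-- def solution(truth, parties):
--     # Incremental disjoint-component merging: one pass over the parties builds the
--     # connected components of people (merging every component a party touches),
--     # then one marking pass collects the people whose component meets the truth
--     # set, and a final pass counts the parties disjoint from those people.
--     comps = []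
--     for p in parties:
--         s = set(p)
--         keep = []
--         for c in comps:
--             if c & s:
--                 s |= c
--             else:
--                 keep.append(c)
--         keep.append(s)
--         comps = keep
--     tr = set(truth)
--     bad = set()
--     for c in comps:
--         if c & tr:
--             bad |= c
--     return sum(1 for p in parties if not (set(p) & bad))
-- ===== Notes on version B (the rewrite author's own statement) =====
-- stated objective: faster
-- what changed: A runs len(parties) unconditional fixed-point passes that grow the truth set; B never propagates truth at all: one pass merges the parties into disjoint person-components, a second pass unions the components that meet the truth set, and the count is taken against that union.
import Mathlib
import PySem

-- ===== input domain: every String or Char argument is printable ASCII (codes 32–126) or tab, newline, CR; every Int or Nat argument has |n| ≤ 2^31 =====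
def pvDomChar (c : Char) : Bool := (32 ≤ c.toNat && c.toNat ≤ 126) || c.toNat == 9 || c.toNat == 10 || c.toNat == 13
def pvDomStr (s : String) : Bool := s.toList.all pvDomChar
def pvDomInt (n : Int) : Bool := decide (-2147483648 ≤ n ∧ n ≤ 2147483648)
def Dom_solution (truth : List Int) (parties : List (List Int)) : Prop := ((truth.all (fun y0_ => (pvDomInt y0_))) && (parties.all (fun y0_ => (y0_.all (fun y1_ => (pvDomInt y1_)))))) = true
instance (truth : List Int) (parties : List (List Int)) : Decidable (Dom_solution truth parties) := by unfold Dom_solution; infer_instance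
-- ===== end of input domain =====

-- B replaces A's len(parties) fixed-point passes by a single pass that merges the parties
-- into disjoint person-components, then marks the components meeting truth (objective: faster).

-- ===== PORT A =====

-- one pass of A's inner 'for party in parties' loop over the truth set
def stepA (parties : List (List Int)) (t : PySem.Set Int) : PySem.Set Int :=
  parties.foldl
    (fun t party =>
      if PySem.Set.inter (PySem.Set.ofList party) t ≠ [] then
        PySem.Set.update t (PySem.Set.ofList party)
      else t) t

def solution (truth : List Int) (parties : List (List Int)) : Int :=
  let t : PySem.Set Int :=
    (PySem.List.pyRange 0 (parties.length : Int) 1).foldl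
      (fun t _ => stepA parties t) (PySem.Set.ofList truth)
  parties.foldl
    (fun count party =>
      if ¬ (PySem.Set.inter (PySem.Set.ofList party) t ≠ []) then count + 1 else count) 0

-- ===== PORT B =====

-- body of Source B's 'for c in comps' loop: state is the pair (s, keep)
def mergeStep (acc : PySem.Set Int × List (PySem.Set Int)) (c : PySem.Set Int) :
    PySem.Set Int × List (PySem.Set Int) :=
  if PySem.Set.inter c acc.1 ≠ [] then (PySem.Set.union acc.1 c, acc.2)
  else (acc.1, acc.2 ++ [c])

-- Source B's first loop: incremental merging of the parties into components
def buildComps (parties : List (List Int)) : List (PySem.Set Int) :=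
  parties.foldl
    (fun comps p =>
      let r := comps.foldl mergeStep (PySem.Set.ofList p, ([] : List (PySem.Set Int)))
      r.2 ++ [r.1]) []

-- Source B's marking loop: union of the components meeting the truth set
def badSet (truth : List Int) (comps : List (PySem.Set Int)) : PySem.Set Int :=
  comps.foldl
    (fun bad c =>
      if PySem.Set.inter c (PySem.Set.ofList truth) ≠ [] then PySem.Set.union bad c else bad)
    PySem.Set.empty

def solution_alt (truth : List Int) (parties : List (List Int)) : Int :=
  let comps := buildComps parties
  let bad := badSet truth comps
  parties.foldl
    (fun acc p => if ¬ (PySem.Set.inter (PySem.Set.ofList p) bad ≠ []) then acc + 1 else acc) 0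

-- ===== PRECONDITION & SPEC =====
def Spec_solution (truth : List Int) (parties : List (List Int)) (out : Int) : Prop := out = solution_alt truth parties
instance (truth : List Int) (parties : List (List Int)) (out : Int) : Decidable (Spec_solution truth parties out) := by unfold Spec_solution; infer_instance

-- ===== CLAIM (what is proved, stated in full; the proofs are below) =====
def Claim_equal_solution : Prop := ∀ (truth : List Int) (parties : List (List Int)), Dom_solution truth parties → Spec_solution truth parties (solution truth parties)

-- ===== LEMMAS AND PROOFS =====

-- x is reachable from the seed set K0 by repeatedly absorbing whole parties that share a member
inductive Cl (K0 : List Int) (ps : List (List Int)) : Int → Prop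
  | base {x : Int} : x ∈ K0 → Cl K0 ps x
  | step {p : List Int} {x y : Int} : p ∈ ps → y ∈ p → Cl K0 ps y → x ∈ p → Cl K0 ps x

-- Python truthiness of 'set(p) & t'
lemma inter_ne_nil_iff (s t : List Int) : PySem.Set.inter s t ≠ [] ↔ ∃ x, x ∈ s ∧ x ∈ t := by
  rw [← List.isEmpty_eq_false_iff, List.isEmpty_eq_false_iff_exists_mem]
  constructor
  · rintro ⟨x, hx⟩; exact ⟨x, (PySem.Set.mem_inter s t x).mp hx⟩
  · rintro ⟨x, hx⟩; exact ⟨x, (PySem.Set.mem_inter s t x).mpr hx⟩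

lemma update_of_subset (s : PySem.Set Int) (xs : List Int) (h : ∀ x ∈ xs, x ∈ s) :
    PySem.Set.update s xs = s := by
  induction xs generalizing s with
  | nil => rfl
  | cons x xs ih =>
    rw [PySem.Set.update_cons, PySem.Set.add_of_mem (h x (by simp))]
    exact ih s (fun y hy => h y (by simp [hy]))

lemma mem_stepA_of_mem {ps : List (List Int)} {t : PySem.Set Int} {x : Int} (h : x ∈ t) :
    x ∈ stepA ps t := by
  induction ps generalizing t with
  | nil => exact h
  | cons p ps ih =>
    simp only [stepA, List.foldl_cons]
    split
    · exact ih ((PySem.Set.mem_update _ _ _).mpr (Or.inl h))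
    · exact ih h

lemma stepA_cl {K0 : List Int} {ps0 ps : List (List Int)} {t : PySem.Set Int}
    (hps : ∀ p ∈ ps, p ∈ ps0) (ht : ∀ y ∈ t, Cl K0 ps0 y) :
    ∀ x ∈ stepA ps t, Cl K0 ps0 x := by
  induction ps generalizing t with
  | nil => exact ht
  | cons p ps ih =>
    simp only [stepA, List.foldl_cons]
    split
    · rename_i hc
      refine ih (fun q hq => hps q (by simp [hq])) (fun y hy => ?_)
      rcases (PySem.Set.mem_update _ _ _).mp hy with h | h
      · exact ht y h
      · rcases (inter_ne_nil_iff _ _).mp hc with ⟨z, hz1, hz2⟩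
        rw [PySem.Set.mem_ofList] at hz1
        rw [PySem.Set.mem_ofList] at h
        exact Cl.step (hps p (by simp)) hz1 (ht z hz2) h
    · exact ih (fun q hq => hps q (by simp [hq])) ht

lemma stepA_meets {ps : List (List Int)} {t : PySem.Set Int} {p : List Int}
    (hp : p ∈ ps) (hm : ∃ x, x ∈ p ∧ x ∈ t) : ∀ x ∈ p, x ∈ stepA ps t := by
  induction ps generalizing t with
  | nil => cases hp
  | cons q ps ih =>
    simp only [stepA, List.foldl_cons]
    rcases List.mem_cons.mp hp with rfl | hp'
    · rw [if_pos (by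
        rcases hm with ⟨x, hx1, hx2⟩
        exact (inter_ne_nil_iff _ _).mpr ⟨x, (PySem.Set.mem_ofList _ _).mpr hx1, hx2⟩)]
      intro x hx
      exact mem_stepA_of_mem ((PySem.Set.mem_update _ _ _).mpr (Or.inr ((PySem.Set.mem_ofList _ _).mpr hx)))
    · split
      · rcases hm with ⟨x, hx1, hx2⟩
        exact ih hp' ⟨x, hx1, (PySem.Set.mem_update _ _ _).mpr (Or.inl hx2)⟩
      · exact ih hp' hm

def Sat (ps : List (List Int)) (t : List Int) : Prop :=
  ∀ p ∈ ps, (∃ x, x ∈ p ∧ x ∈ t) → ∀ x ∈ p, x ∈ t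

lemma stepA_fix {ps : List (List Int)} {t : PySem.Set Int} (hsat : Sat ps t) :
    stepA ps t = t := by
  induction ps with
  | nil => rfl
  | cons p ps ih =>
    simp only [stepA, List.foldl_cons]
    have h1 : ∀ (r : PySem.Set Int), r = t → (if PySem.Set.inter (PySem.Set.ofList p) t ≠ [] then
        PySem.Set.update t (PySem.Set.ofList p) else t) = t := by
      intro r _
      split
      · rename_i hc
        rcases (inter_ne_nil_iff _ _).mp hc with ⟨z, hz1, hz2⟩
        rw [PySem.Set.mem_ofList] at hz1
        exact update_of_subset t _ (fun x hx =>
          hsat p (by simp) ⟨z, hz1, hz2⟩ x ((PySem.Set.mem_ofList _ _).mp hx))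
      · rfl
    rw [h1 t rfl]
    exact ih (fun q hq hm => hsat q (by simp [hq]) hm)

lemma stepA_not_sat {ps : List (List Int)} {t : PySem.Set Int} (h : ¬ Sat ps t) :
    ∃ p ∈ ps, (∀ x ∈ p, x ∈ stepA ps t) ∧ ¬ (∀ x ∈ p, x ∈ t) := by
  unfold Sat at h
  push Not at h
  rcases h with ⟨p, hp, hm, x, hx1, hx2⟩
  exact ⟨p, hp, stepA_meets hp hm, fun hall => hx2 (hall x hx1)⟩

def subCnt (ps : List (List Int)) (t : List Int) : Nat :=
  ps.countP (fun p => p.all (fun x => t.contains x))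

lemma countP_lt {α : Type} {l : List α} {f g : α → Bool}
    (h : ∀ x ∈ l, f x → g x) (hx : ∃ x ∈ l, g x ∧ ¬ f x) : l.countP f < l.countP g := by
  induction l with
  | nil => rcases hx with ⟨x, hx, _⟩; cases hx
  | cons a l ih =>
    rcases hx with ⟨x, hx, hgx, hfx⟩
    rcases List.mem_cons.mp hx with rfl | hx'
    · have hf : f x = false := by simpa using hfx
      rw [List.countP_cons, List.countP_cons, hf, hgx]
      simp only [if_true, Bool.false_eq_true, if_false, add_zero]
      have : l.countP f ≤ l.countP g := List.countP_mono_left (fun y hy => h y (by simp [hy]))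
      omega
    · have h1 := ih (fun y hy => h y (by simp [hy])) ⟨x, hx', hgx, hfx⟩
      rw [List.countP_cons, List.countP_cons]
      have : (if f a then 1 else 0) ≤ (if g a then 1 else 0) := by
        by_cases hfa : f a
        · simp [hfa, h a (by simp) hfa]
        · simp [hfa]
      omega

lemma sat_iterate {ps : List (List Int)} {t : PySem.Set Int} (m : Nat) (h : Sat ps t) :
    (stepA ps)^[m] t = t := by
  induction m with
  | zero => rfl
  | succ m ih => rw [Function.iterate_succ_apply, stepA_fix h, ih]

lemma iter_sat_or (ps : List (List Int)) :
    ∀ (m : Nat) (t : PySem.Set Int), Sat ps ((stepA ps)^[m] t) ∨ m + subCnt ps t ≤ subCnt ps ((stepA ps)^[m] t) := by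
  intro m
  induction m with
  | zero => intro t; right; simp
  | succ m ih =>
    intro t
    by_cases hs : Sat ps t
    · left; rw [sat_iterate _ hs]; exact hs
    · rcases ih (stepA ps t) with h | h
      · left; rwa [Function.iterate_succ_apply]
      · right
        rw [Function.iterate_succ_apply]
        have hlt : subCnt ps t < subCnt ps (stepA ps t) := by
          rcases stepA_not_sat hs with ⟨p, hp, hsub, hnsub⟩
          refine countP_lt (fun q hq hqt => ?_) ⟨p, hp, ?_, ?_⟩
          · simp only [List.all_eq_true] at hqt ⊢
            intro x hx
            simpa using mem_stepA_of_mem (t := t) (by simpa using hqt x hx)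
          · simp only [List.all_eq_true]
            intro x hx; simpa using hsub x hx
          · simp only [List.all_eq_true]
            intro hall; exact hnsub (fun x hx => by simpa using hall x hx)
        omega

lemma A_sat (ps : List (List Int)) (t0 : PySem.Set Int) : Sat ps ((stepA ps)^[ps.length] t0) := by
  rcases iter_sat_or ps ps.length t0 with h | h
  · exact h
  · have hle : subCnt ps ((stepA ps)^[ps.length] t0) ≤ ps.length := List.countP_le_length
    have hall : ∀ p ∈ ps, (p.all (fun x => ((stepA ps)^[ps.length] t0).contains x)) = true := by
      apply List.countP_eq_length.mp
      show subCnt ps ((stepA ps)^[ps.length] t0) = ps.length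
      omega
    intro p hp _ x hx
    have := hall p hp
    simp only [List.all_eq_true] at this
    simpa using this x hx

lemma mem_iterate_of_mem {ps : List (List Int)} {t : PySem.Set Int} {x : Int} (m : Nat) (h : x ∈ t) :
    x ∈ (stepA ps)^[m] t := by
  induction m generalizing t with
  | zero => exact h
  | succ m ih => rw [Function.iterate_succ_apply]; exact ih (mem_stepA_of_mem h)

lemma iterate_cl {K0 : List Int} {ps : List (List Int)} {t : PySem.Set Int} (m : Nat)
    (ht : ∀ y ∈ t, Cl K0 ps y) : ∀ x ∈ (stepA ps)^[m] t, Cl K0 ps x := by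
  induction m generalizing t with
  | zero => exact ht
  | succ m ih => rw [Function.iterate_succ_apply]; exact ih (stepA_cl (fun p hp => hp) ht)

lemma SA_iff_Cl (truth : List Int) (ps : List (List Int)) (x : Int) :
    x ∈ (stepA ps)^[ps.length] (PySem.Set.ofList truth) ↔ Cl truth ps x := by
  constructor
  · exact fun h => iterate_cl _ (fun y hy => Cl.base ((PySem.Set.mem_ofList _ _).mp hy)) x h
  · intro h
    induction h with
    | base hx => exact mem_iterate_of_mem _ ((PySem.Set.mem_ofList _ _).mpr hx)
    | step hp hy _ hx ihy => exact A_sat ps _ _ hp ⟨_, hy, ihy⟩ _ hx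

lemma inter_isEmpty_iff (s t : List Int) :
    (PySem.Set.inter s t).isEmpty = true ↔ ¬ ∃ x, x ∈ s ∧ x ∈ t := by
  rw [List.isEmpty_iff, ← inter_ne_nil_iff]; tauto

lemma foldl_iterate {α β : Type} (g : α → α) (l : List β) (t0 : α) :
    l.foldl (fun t _ => g t) t0 = g^[l.length] t0 := by
  induction l generalizing t0 with
  | nil => rfl
  | cons b l ih => rw [List.foldl_cons, ih, List.length_cons, Function.iterate_succ_apply]

lemma foldl_count_prop (l : List (List Int)) (t : PySem.Set Int) :
    l.foldl (fun count party =>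
      if ¬ (PySem.Set.inter (PySem.Set.ofList party) t ≠ []) then count + 1 else count) (0 : Int)
    = (l.countP (fun party => (PySem.Set.inter (PySem.Set.ofList party) t).isEmpty) : Int) := by
  have h := PySem.List.foldl_count_if
    (fun party => (PySem.Set.inter (PySem.Set.ofList party) t).isEmpty) l 0
  rw [zero_add] at h
  rw [← h]
  apply List.foldl_ext
  intro c party _
  by_cases hc : PySem.Set.inter (PySem.Set.ofList party) t = []
  · simp [hc]
  · simp [hc, List.isEmpty_iff]

-- ---- B-side lemmas: the inner merge fold ----

-- seed monotonicity of the closure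
lemma cl_mono_seed {K K' : List Int} {ps : List (List Int)}
    (h : ∀ k ∈ K, Cl K' ps k) : ∀ x, Cl K ps x → Cl K' ps x := by
  intro x hx
  induction hx with
  | base hm => exact h _ hm
  | step hp hy _ hxp ihy => exact Cl.step hp hy ihy hxp

-- every pair of members of S is Cl-connected (S is one component)
def ConnSet (ps : List (List Int)) (S : PySem.Set Int) : Prop :=
  ∀ t ∈ S, ∀ x ∈ S, Cl [t] ps x

def InvConn (ps : List (List Int)) (comps : List (PySem.Set Int)) : Prop :=
  ∀ c ∈ comps, ConnSet ps c

def InvDisj (comps : List (PySem.Set Int)) : Prop :=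
  List.Pairwise (fun a b => ∀ x : Int, x ∈ a → x ∉ b) comps

def InvCover (seen : List (List Int)) (comps : List (PySem.Set Int)) : Prop :=
  ∀ p ∈ seen, ∃ c ∈ comps, ∀ x ∈ p, x ∈ c

lemma inner_keep_sub (comps : List (PySem.Set Int)) :
    ∀ (s : PySem.Set Int) (keep : List (PySem.Set Int)) (k : PySem.Set Int), k ∈ keep →
      k ∈ (comps.foldl mergeStep (s, keep)).2 := by
  induction comps with
  | nil => intro s keep k hk; exact hk
  | cons c rest ih =>
    intro s keep k hk
    simp only [List.foldl_cons, mergeStep]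
    split
    · exact ih _ _ _ hk
    · exact ih _ _ _ (by simp [hk])

lemma inner_mem_s (comps : List (PySem.Set Int)) :
    ∀ (s : PySem.Set Int) (keep : List (PySem.Set Int)) (x : Int), x ∈ s →
      x ∈ (comps.foldl mergeStep (s, keep)).1 := by
  induction comps with
  | nil => intro s keep x hx; exact hx
  | cons c rest ih =>
    intro s keep x hx
    simp only [List.foldl_cons, mergeStep]
    split
    · exact ih _ _ _ ((PySem.Set.mem_union _ _ _).mpr (Or.inl hx))
    · exact ih _ _ _ hx

lemma inner_keep_from (comps : List (PySem.Set Int)) :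
    ∀ (s : PySem.Set Int) (keep : List (PySem.Set Int)) (k : PySem.Set Int),
      k ∈ (comps.foldl mergeStep (s, keep)).2 → k ∈ keep ∨ k ∈ comps := by
  induction comps with
  | nil => intro s keep k hk; exact Or.inl hk
  | cons c rest ih =>
    intro s keep k hk
    simp only [List.foldl_cons, mergeStep] at hk
    split at hk
    · rcases ih _ _ _ hk with h | h
      · exact Or.inl h
      · exact Or.inr (by simp [h])
    · rcases ih _ _ _ hk with h | h
      · rcases List.mem_append.mp h with h' | h'
        · exact Or.inl h'
        · exact Or.inr (by simp [List.mem_singleton.mp h'])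
      · exact Or.inr (by simp [h])

lemma inner_absorb (comps : List (PySem.Set Int)) :
    ∀ (s : PySem.Set Int) (keep : List (PySem.Set Int)) (c : PySem.Set Int), c ∈ comps →
      c ∈ (comps.foldl mergeStep (s, keep)).2 ∨ ∀ x ∈ c, x ∈ (comps.foldl mergeStep (s, keep)).1 := by
  induction comps with
  | nil => intro s keep c hc; cases hc
  | cons a rest ih =>
    intro s keep c hc
    rcases List.mem_cons.mp hc with rfl | hc'
    · simp only [List.foldl_cons, mergeStep]
      split
      · right
        intro x hx
        exact inner_mem_s _ _ _ _ ((PySem.Set.mem_union _ _ _).mpr (Or.inr hx))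
      · left
        exact inner_keep_sub _ _ _ _ (by simp)
    · simp only [List.foldl_cons, mergeStep]
      split
      · exact ih _ _ _ hc'
      · exact ih _ _ _ hc'

lemma inner_disj (comps : List (PySem.Set Int)) :
    ∀ (s : PySem.Set Int) (keep : List (PySem.Set Int)),
      InvDisj comps →
      (∀ k ∈ keep, ∀ c ∈ comps, ∀ x : Int, x ∈ k → x ∉ c) →
      (∀ k ∈ keep, ∀ x : Int, x ∈ k → x ∉ s) →
      InvDisj keep →
      InvDisj ((comps.foldl mergeStep (s, keep)).2 ++ [(comps.foldl mergeStep (s, keep)).1]) := by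
  induction comps with
  | nil =>
    intro s keep _ _ hks hkeep
    simp only [List.foldl_nil]
    rw [InvDisj, List.pairwise_append]
    exact ⟨hkeep, by simp, by intro a ha b hb; rw [List.mem_singleton] at hb; subst hb; exact hks a ha⟩
  | cons c rest ih =>
    intro s keep hdisj hkc hks hkeep
    have hdrest : InvDisj rest := (List.pairwise_cons.mp hdisj).2
    have hcrest : ∀ b ∈ rest, ∀ x : Int, x ∈ c → x ∉ b := (List.pairwise_cons.mp hdisj).1
    simp only [List.foldl_cons, mergeStep]
    split
    · -- c absorbed into s
      refine ih _ _ hdrest (fun k hk d hd => hkc k hk d (by simp [hd])) ?_ hkeep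
      intro k hk x hx hxu
      rcases (PySem.Set.mem_union _ _ _).mp hxu with h | h
      · exact hks k hk x hx h
      · exact hkc k hk c (by simp) x hx h
    · -- c kept
      rename_i hne
      have hcs : ∀ x : Int, x ∈ c → x ∉ s := by
        intro x hx hxs
        exact hne ((inter_ne_nil_iff _ _).mpr ⟨x, hx, hxs⟩)
      refine ih _ _ hdrest ?_ ?_ ?_
      · intro k hk d hd
        rcases List.mem_append.mp hk with h | h
        · exact hkc k h d (by simp [hd])
        · rw [List.mem_singleton.mp h]; exact hcrest d hd
      · intro k hk
        rcases List.mem_append.mp hk with h | h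
        · exact hks k h
        · rw [List.mem_singleton.mp h]; exact hcs
      · rw [InvDisj, List.pairwise_append]
        refine ⟨hkeep, by simp, ?_⟩
        intro a ha b hb
        rw [List.mem_singleton.mp hb]
        exact hkc a ha c (by simp)

lemma conn_union {ps : List (List Int)} {s c : PySem.Set Int} {z : Int}
    (hzs : z ∈ s) (hzc : z ∈ c) (hs : ConnSet ps s) (hc : ConnSet ps c) :
    ConnSet ps (PySem.Set.union s c) := by
  intro t ht x hx
  have bridge : ∀ {a b : Int}, Cl [a] ps z → Cl [z] ps b → Cl [a] ps b := by
    intro a b h1 h2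
    exact cl_mono_seed (fun k hk => by rw [List.mem_singleton.mp hk]; exact h1) b h2
  rcases (PySem.Set.mem_union _ _ _).mp ht with ht' | ht' <;>
    rcases (PySem.Set.mem_union _ _ _).mp hx with hx' | hx'
  · exact hs t ht' x hx'
  · exact bridge (hs t ht' z hzs) (hc z hzc x hx')
  · exact bridge (hc t ht' z hzc) (hs z hzs x hx')
  · exact hc t ht' x hx'

lemma inner_conn {ps : List (List Int)} (comps : List (PySem.Set Int)) :
    ∀ (s : PySem.Set Int) (keep : List (PySem.Set Int)),
      ConnSet ps s → InvConn ps comps →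
      ConnSet ps (comps.foldl mergeStep (s, keep)).1 := by
  induction comps with
  | nil => intro s keep hs _; exact hs
  | cons c rest ih =>
    intro s keep hs hconn
    simp only [List.foldl_cons, mergeStep]
    split
    · rename_i hne
      rcases (inter_ne_nil_iff _ _).mp hne with ⟨z, hzc, hzs⟩
      exact ih _ _ (conn_union hzs hzc hs (hconn c (by simp)))
        (fun d hd => hconn d (by simp [hd]))
    · exact ih _ _ hs (fun d hd => hconn d (by simp [hd]))

-- outer fold: all three invariants are maintained
lemma build_inv {parties : List (List Int)} (ps : List (List Int)) :
    ∀ (comps : List (PySem.Set Int)) (seen : List (List Int)),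
      (∀ p ∈ ps, p ∈ parties) →
      InvConn parties comps → InvDisj comps → InvCover seen comps →
      InvConn parties (ps.foldl
          (fun comps p =>
            let r := comps.foldl mergeStep (PySem.Set.ofList p, ([] : List (PySem.Set Int)))
            r.2 ++ [r.1]) comps) ∧
      InvDisj (ps.foldl
          (fun comps p =>
            let r := comps.foldl mergeStep (PySem.Set.ofList p, ([] : List (PySem.Set Int)))
            r.2 ++ [r.1]) comps) ∧
      InvCover (seen ++ ps) (ps.foldl
          (fun comps p =>
            let r := comps.foldl mergeStep (PySem.Set.ofList p, ([] : List (PySem.Set Int)))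
            r.2 ++ [r.1]) comps) := by
  induction ps with
  | nil =>
    intro comps seen _ h1 h2 h3
    simpa using ⟨h1, h2, h3⟩
  | cons p rest ih =>
    intro comps seen hps h1 h2 h3
    have hp : p ∈ parties := hps p (by simp)
    have hpconn : ConnSet parties (PySem.Set.ofList p) := by
      intro t ht x hx
      rw [PySem.Set.mem_ofList] at ht hx
      exact Cl.step hp ht (Cl.base (by simp)) hx
    simp only [List.foldl_cons]
    have h1' : InvConn parties
        ((comps.foldl mergeStep (PySem.Set.ofList p, ([] : List (PySem.Set Int)))).2 ++
          [(comps.foldl mergeStep (PySem.Set.ofList p, ([] : List (PySem.Set Int)))).1]) := by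
      intro c hc
      rcases List.mem_append.mp hc with h | h
      · rcases inner_keep_from comps _ _ _ h with h' | h'
        · cases h'
        · exact h1 c h'
      · rw [List.mem_singleton.mp h]
        exact inner_conn comps _ _ hpconn h1
    have h2' : InvDisj
        ((comps.foldl mergeStep (PySem.Set.ofList p, ([] : List (PySem.Set Int)))).2 ++
          [(comps.foldl mergeStep (PySem.Set.ofList p, ([] : List (PySem.Set Int)))).1]) :=
      inner_disj comps _ _ h2 (by simp) (by simp) List.Pairwise.nil
    have h3' : InvCover (seen ++ [p])
        ((comps.foldl mergeStep (PySem.Set.ofList p, ([] : List (PySem.Set Int)))).2 ++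
          [(comps.foldl mergeStep (PySem.Set.ofList p, ([] : List (PySem.Set Int)))).1]) := by
      intro q hq
      rcases List.mem_append.mp hq with hq' | hq'
      · rcases h3 q hq' with ⟨c, hc, hsub⟩
        rcases inner_absorb comps _ _ c hc with h | h
        · exact ⟨c, List.mem_append.mpr (Or.inl h), hsub⟩
        · exact ⟨_, List.mem_append.mpr (Or.inr (by simp)), fun x hx => h x (hsub x hx)⟩
      · obtain rfl : q = p := List.mem_singleton.mp hq'
        refine ⟨(comps.foldl mergeStep (PySem.Set.ofList q, ([] : List (PySem.Set Int)))).1,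
          List.mem_append.mpr (Or.inr (List.mem_singleton.mpr rfl)), fun x hx => ?_⟩
        exact inner_mem_s comps _ _ x ((PySem.Set.mem_ofList _ _).mpr hx)
    have := ih _ (seen ++ [p]) (fun q hq => hps q (by simp [hq])) h1' h2' h3'
    simpa using this

-- members of the same element are in the same component
lemma same_comp {comps : List (PySem.Set Int)} (hd : InvDisj comps)
    {c c' : PySem.Set Int} (hc : c ∈ comps) (hc' : c' ∈ comps)
    {y : Int} (hy : y ∈ c) (hy' : y ∈ c') : ∀ x ∈ c, x ∈ c' := by
  induction comps with
  | nil => cases hc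
  | cons a rest ih =>
    have ha : ∀ b ∈ rest, ∀ x : Int, x ∈ a → x ∉ b := (List.pairwise_cons.mp hd).1
    rcases List.mem_cons.mp hc with rfl | hcr <;> rcases List.mem_cons.mp hc' with rfl | hcr'
    · exact fun x hx => hx
    · exact absurd hy' (ha c' hcr' y hy)
    · exact absurd hy (ha c hcr y hy')
    · exact ih (List.pairwise_cons.mp hd).2 hcr hcr'

-- membership in Source B's 'bad' set
lemma mem_badSet_iff (truth : List Int) (comps : List (PySem.Set Int)) (x : Int) :
    x ∈ badSet truth comps ↔ ∃ c ∈ comps, x ∈ c ∧ ∃ t, t ∈ c ∧ t ∈ truth := by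
  have gen : ∀ (comps : List (PySem.Set Int)) (b : PySem.Set Int),
      x ∈ comps.foldl
        (fun bad c =>
          if PySem.Set.inter c (PySem.Set.ofList truth) ≠ [] then PySem.Set.union bad c else bad) b ↔
      x ∈ b ∨ ∃ c ∈ comps, x ∈ c ∧ ∃ t, t ∈ c ∧ t ∈ truth := by
    intro comps
    induction comps with
    | nil => simp
    | cons c rest ih =>
      intro b
      simp only [List.foldl_cons]
      split
      · rename_i hne
        rcases (inter_ne_nil_iff _ _).mp hne with ⟨t, htc, htt⟩
        rw [PySem.Set.mem_ofList] at htt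
        rw [ih]
        constructor
        · rintro (h | h)
          · rcases (PySem.Set.mem_union _ _ _).mp h with h' | h'
            · exact Or.inl h'
            · exact Or.inr ⟨c, by simp, h', t, htc, htt⟩
          · rcases h with ⟨d, hd, hxd, u, hud, hut⟩
            exact Or.inr ⟨d, by simp [hd], hxd, u, hud, hut⟩
        · rintro (h | ⟨d, hd, hxd, u, hud, hut⟩)
          · exact Or.inl ((PySem.Set.mem_union _ _ _).mpr (Or.inl h))
          · rcases List.mem_cons.mp hd with rfl | hd'
            · exact Or.inl ((PySem.Set.mem_union _ _ _).mpr (Or.inr hxd))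
            · exact Or.inr ⟨d, hd', hxd, u, hud, hut⟩
      · rename_i hne
        rw [ih]
        constructor
        · rintro (h | ⟨d, hd, hxd, u, hud, hut⟩)
          · exact Or.inl h
          · exact Or.inr ⟨d, by simp [hd], hxd, u, hud, hut⟩
        · rintro (h | ⟨d, hd, hxd, u, hud, hut⟩)
          · exact Or.inl h
          · rcases List.mem_cons.mp hd with rfl | hd'
            · exact absurd ((inter_ne_nil_iff _ _).mpr ⟨u, hud, (PySem.Set.mem_ofList _ _).mpr hut⟩) hne
            · exact Or.inr ⟨d, hd', hxd, u, hud, hut⟩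
  have := gen comps PySem.Set.empty
  simpa [badSet, PySem.Set.empty] using this

-- on the people occurring in some party, 'bad' is exactly A's closure
lemma bad_iff_cl (truth : List Int) (parties : List (List Int)) :
    ∀ p ∈ parties, ∀ x ∈ p,
      (x ∈ badSet truth (buildComps parties) ↔ Cl truth parties x) := by
  obtain ⟨hconn, hdisj, hcover⟩ :=
    build_inv (parties := parties) parties [] [] (fun _ h => h)
      (by intro c hc; cases hc) List.Pairwise.nil (by intro p hp; cases hp)
  rw [List.nil_append] at hcover
  have hB : buildComps parties = parties.foldl
      (fun comps p =>
        let r := comps.foldl mergeStep (PySem.Set.ofList p, ([] : List (PySem.Set Int)))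
        r.2 ++ [r.1]) [] := rfl
  rw [← hB] at hconn hdisj hcover
  intro p hp x hx
  constructor
  · intro hbad
    rcases (mem_badSet_iff _ _ _).mp hbad with ⟨c, hc, hxc, t, htc, htt⟩
    exact cl_mono_seed (fun k hk => by rw [List.mem_singleton.mp hk]; exact Cl.base htt) x
      (hconn c hc t htc x hxc)
  · intro hcl
    -- strengthen: any Cl-reachable person occurring in a party is in bad
    have main : ∀ y, Cl truth parties y → (∃ q ∈ parties, y ∈ q) → y ∈ badSet truth (buildComps parties) := by
      intro y hy
      induction hy with
      | base hm =>
        rintro ⟨q, hq, hyq⟩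
        rcases hcover q hq with ⟨c, hc, hsub⟩
        exact (mem_badSet_iff _ _ _).mpr ⟨c, hc, hsub _ hyq, _, hsub _ hyq, hm⟩
      | @step q y' z hq hz _ hy' ihz =>
        rintro ⟨_, _, _⟩
        have hzbad := ihz ⟨q, hq, hz⟩
        rcases (mem_badSet_iff _ _ _).mp hzbad with ⟨c', hc', hzc', t, htc', htt⟩
        rcases hcover q hq with ⟨c, hc, hsub⟩
        have hzc : z ∈ c := hsub _ hz
        have hsame := same_comp hdisj hc hc' hzc hzc'
        exact (mem_badSet_iff _ _ _).mpr ⟨c', hc', hsame _ (hsub _ hy'), t, htc', htt⟩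
    exact main x hcl ⟨p, hp, hx⟩

-- ===== VERDICT (by name: the statement is the Claim_ definition above) =====
theorem solution_spec : Claim_equal_solution := by
  intro truth parties _
  unfold Spec_solution solution solution_alt
  have hlen : (PySem.List.pyRange 0 (parties.length : Int) 1).length = parties.length := by
    rw [PySem.List.length_pyRange_one]
    simp
  rw [foldl_iterate, hlen, foldl_count_prop, foldl_count_prop]
  congr 1
  apply List.countP_congr
  intro p hp
  rw [inter_isEmpty_iff, inter_isEmpty_iff]
  constructor <;> intro h hc <;> apply h
  · rcases hc with ⟨x, hx1, hx2⟩
    rw [PySem.Set.mem_ofList] at hx1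
    refine ⟨x, (PySem.Set.mem_ofList _ _).mpr hx1, ?_⟩
    rw [SA_iff_Cl]
    exact (bad_iff_cl truth parties p hp x hx1).mp hx2
  · rcases hc with ⟨x, hx1, hx2⟩
    rw [PySem.Set.mem_ofList] at hx1
    refine ⟨x, (PySem.Set.mem_ofList _ _).mpr hx1, ?_⟩
    rw [SA_iff_Cl] at hx2
    exact (bad_iff_cl truth parties p hp x hx1).mpr hx2
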